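-- pv_equiv track=rewrite | github.com/senyalin/MELaTeX | sub_sequence.py | subsequence_pos
-- ===== SOURCE A (Python) =====
-- def default_equal(e1, e2):
--     return e1 == e2
--
-- def subsequence_pos(seq1, seq2, equal_func=default_equal):
--     """
--     check whether seq1 is a sub sequence of seq2
--
--     :param seq1:
--     :param seq2:
--     :return:
--     """
--     assert isinstance(seq1, list) and isinstance(seq2, list)
--     assert len(seq1) > 0
--
--     start_pos_list = []
--     for i, elem2 in enumerate(seq2):
--         #if elem2 == seq1[0]:
--         if equal_func(elem2, seq1[0]):
--             start_pos_list.append(i)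
--
--     for start_i in start_pos_list:
--         found_in_consistent = False
--         j = 0
--         while j < len(seq1):
--             if start_i+j >= len(seq2):
--                 break
--             if not equal_func(seq1[j], seq2[start_i + j]):
--                 found_in_consistent = True
--                 break
--             j += 1
--
--         # if no the j==len(seq1) checking, many bad are added.
--         if j == len(seq1) and not found_in_consistent:
--             return start_i
--
--     return None
-- ===== SOURCE B (Python) =====
-- def default_equal(e1, e2):
--     return e1 == e2
--
-- def subsequence_pos(seq1, seq2, equal_func=default_equal):
--     """Single scan: compare seq1 against each window of seq2 directly (no candidate prefilter)."""
--     assert isinstance(seq1, list) and isinstance(seq2, list)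
--     assert len(seq1) > 0
--     m = len(seq1)
--     for i in range(len(seq2) - m + 1):
--         if all(map(equal_func, seq1, seq2[i:i + m])):
--             return i
--     return None
-- ===== Notes on version B (the rewrite author's own statement) =====
-- stated objective: alternative
-- what changed: B replaces A's two-phase scheme (collect all first-element match positions into a list, then verify each with a manual while loop and a found_in_consistent flag) by a single direct scan over the valid window starts comparing seq1 with the slice seq2[i:i+m].
import Mathlib
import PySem

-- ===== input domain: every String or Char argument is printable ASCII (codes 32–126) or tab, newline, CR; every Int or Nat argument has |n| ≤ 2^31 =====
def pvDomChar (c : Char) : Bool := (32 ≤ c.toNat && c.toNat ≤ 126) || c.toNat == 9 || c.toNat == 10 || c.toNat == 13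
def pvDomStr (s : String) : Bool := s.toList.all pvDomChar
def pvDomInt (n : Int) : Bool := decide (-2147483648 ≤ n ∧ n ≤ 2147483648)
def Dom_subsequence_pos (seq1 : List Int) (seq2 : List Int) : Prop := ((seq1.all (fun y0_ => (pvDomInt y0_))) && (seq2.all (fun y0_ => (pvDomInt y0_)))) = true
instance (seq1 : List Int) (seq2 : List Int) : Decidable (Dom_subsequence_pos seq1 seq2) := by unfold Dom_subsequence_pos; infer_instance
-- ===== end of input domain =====

-- B changes the decomposition: one direct scan with a slice comparison instead of A's
-- candidate-list prefilter plus manual while-loop verification; equivalence of return values is proved.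

-- ===== PORT A =====
-- inner while loop: state (j, found_in_consistent); rem = len(seq1) - j counts down
def pvWhileA (seq1 seq2 : List Int) (start_i : Int) : Nat → Int → Int × Bool
  | 0, j => (j, false)
  | rem+1, j =>
    if start_i + j ≥ (seq2.length : Int) then (j, false)
    else if PySem.List.pyGet? seq1 j ≠ PySem.List.pyGet? seq2 (start_i + j) then (j, true)
    else pvWhileA seq1 seq2 start_i rem (j+1)

-- 'for start_i in start_pos_list' with the early return
def pvOuterA (seq1 seq2 : List Int) : List Int → Option Int
  | [] => none
  | s :: rest =>
    let r := pvWhileA seq1 seq2 s seq1.length 0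
    if r.1 = (seq1.length : Int) ∧ r.2 = false then some s else pvOuterA seq1 seq2 rest

def subsequence_pos (seq1 : List Int) (seq2 : List Int) : Option Int :=
  let starts := (PySem.List.enumerate seq2).foldl
    (fun acc p => if some p.2 = PySem.List.pyGet? seq1 0 then acc ++ [p.1] else acc) []
  pvOuterA seq1 seq2 starts

-- ===== PORT B =====
-- 'for i in range(len(seq2) - m + 1)' with 'all(map(equal_func, seq1, seq2[i:i+m]))'
def pvAltGo (seq1 seq2 : List Int) (m : Int) : List Int → Option Int
  | [] => none
  | i :: rest =>
    if (seq1.zip (PySem.List.slice seq2 (some i) (some (i + m)))).all (fun p => p.1 == p.2)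
    then some i else pvAltGo seq1 seq2 m rest

def subsequence_pos_alt (seq1 : List Int) (seq2 : List Int) : Option Int :=
  let m : Int := seq1.length
  pvAltGo seq1 seq2 m (PySem.List.pyRange 0 ((seq2.length : Int) - m + 1) 1)

-- ===== PRECONDITION & SPEC =====
-- A (and B) assert len(seq1) > 0: on seq1 = [] both raise AssertionError, so it is excluded.
def Pre_subsequence_pos (seq1 : List Int) (seq2 : List Int) : Prop := seq1 ≠ []
instance (seq1 : List Int) (seq2 : List Int) : Decidable (Pre_subsequence_pos seq1 seq2) := by unfold Pre_subsequence_pos; infer_instance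
def pvWitness_subsequence_pos : List Int × List Int := ([1, 2], [0, 1, 2, 3])

def Spec_subsequence_pos (seq1 : List Int) (seq2 : List Int) (out : Option Int) : Prop := out = subsequence_pos_alt seq1 seq2
instance (seq1 : List Int) (seq2 : List Int) (out : Option Int) : Decidable (Spec_subsequence_pos seq1 seq2 out) := by unfold Spec_subsequence_pos; infer_instance

-- ===== CLAIM (what is proved, stated in full; the proofs are below) =====
def Claim_equal_subsequence_pos : Prop := ∀ (seq1 : List Int) (seq2 : List Int), Dom_subsequence_pos seq1 seq2 → Pre_subsequence_pos seq1 seq2 → Spec_subsequence_pos seq1 seq2 (subsequence_pos seq1 seq2)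

-- ===== LEMMAS AND PROOFS =====

-- the success condition both programs decide at a window start s
def pvQ (seq1 seq2 : List Int) (s : Nat) : Prop :=
  ∀ k : Nat, k < seq1.length → s + k < seq2.length ∧ seq1[k]? = seq2[s + k]?

lemma pvWhileA_aux (seq1 seq2 : List Int) (s : Nat) :
    ∀ (rem j : Nat), rem + j = seq1.length →
      (pvWhileA seq1 seq2 (s : Int) rem (j : Int) = ((seq1.length : Int), false) ↔
        (∀ k : Nat, j ≤ k → k < seq1.length →
          s + k < seq2.length ∧ seq1[k]? = seq2[s + k]?)) := by
  intro rem
  induction rem with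
  | zero =>
    intro j hj
    have hj' : j = seq1.length := by omega
    subst hj'
    simp [pvWhileA]
    omega
  | succ rem ih =>
    intro j hj
    have hjlt : j < seq1.length := by omega
    have hcast : (s : Int) + (j : Int) = ((s + j : Nat) : Int) := by push_cast; ring
    rw [pvWhileA]
    by_cases hb : (s : Int) + (j : Int) ≥ (seq2.length : Int)
    · have hbn : seq2.length ≤ s + j := by exact_mod_cast hb
      rw [if_pos hb]
      constructor
      · intro h
        exfalso
        have : (j : Int) = (seq1.length : Int) := congrArg Prod.fst h
        omega
      · intro h
        exfalso
        exact absurd (h j le_rfl hjlt).1 (by omega)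
    · rw [ge_iff_le, not_le] at hb
      have hbn : s + j < seq2.length := by exact_mod_cast (hcast ▸ hb)
      rw [if_neg (by omega)]
      by_cases he : PySem.List.pyGet? seq1 (j : Int) ≠ PySem.List.pyGet? seq2 ((s : Int) + (j : Int))
      · rw [if_pos he]
        rw [hcast] at he
        simp only [PySem.List.pyGet?_natCast] at he
        constructor
        · intro h
          exfalso
          have : (true : Bool) = false := congrArg Prod.snd h
          simp at this
        · intro h
          exact absurd (h j le_rfl hjlt).2 he
      · rw [if_neg he]
        rw [not_not] at he
        rw [hcast] at he
        simp only [PySem.List.pyGet?_natCast] at he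
        have hstep : ((j : Int) + 1) = ((j + 1 : Nat) : Int) := by push_cast; ring
        rw [hstep, ih (j + 1) (by omega)]
        constructor
        · intro h k hk1 hk2
          rcases Nat.eq_or_lt_of_le hk1 with rfl | hk1'
          · exact ⟨hbn, he⟩
          · exact h k hk1' hk2
        · intro h k hk1 hk2
          exact h k (by omega) hk2

lemma pvWhileA_iff (seq1 seq2 : List Int) (s : Nat) :
    ((pvWhileA seq1 seq2 (s : Int) seq1.length 0).1 = (seq1.length : Int) ∧
      (pvWhileA seq1 seq2 (s : Int) seq1.length 0).2 = false) ↔ pvQ seq1 seq2 s := by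
  have h := pvWhileA_aux seq1 seq2 s seq1.length 0 (by omega)
  simp only [Nat.cast_zero] at h
  constructor
  · intro hc k hk
    exact (h.mp (Prod.ext_iff.mpr hc)) k (Nat.zero_le k) hk
  · intro hq
    have h2 := h.mpr (fun k _ hk => hq k hk)
    exact ⟨congrArg Prod.fst h2, congrArg Prod.snd h2⟩

lemma pvGood_iff (seq1 seq2 : List Int) (s : Nat) (hm : 0 < seq1.length)
    (hs : s + seq1.length ≤ seq2.length) :
    ((seq1.zip (PySem.List.slice seq2 (some (s : Int)) (some ((s : Int) + (seq1.length : Int))))).all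
        (fun p => p.1 == p.2) = true) ↔ pvQ seq1 seq2 s := by
  rw [PySem.List.slice_natCast_add seq2 s seq1.length, List.all_eq_true]
  have hlen : ((seq2.drop s).take seq1.length).length = seq1.length := by
    simp; omega
  have hz : (seq1.zip ((seq2.drop s).take seq1.length)).length = seq1.length := by
    simp [hlen]
  have hget : ∀ (k : Nat) (hk : k < seq1.length),
      (seq1.zip ((seq2.drop s).take seq1.length))[k]'(by omega) =
        (seq1[k]'hk, seq2[s + k]'(by omega)) := by
    intro k hk
    rw [List.getElem_zip]
    congr 1
    rw [List.getElem_take, List.getElem_drop]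
  constructor
  · intro h k hk
    refine ⟨by omega, ?_⟩
    have hmem : ((seq1[k]'hk, seq2[s + k]'(by omega)) : Int × Int) ∈
        seq1.zip ((seq2.drop s).take seq1.length) :=
      List.mem_iff_getElem.mpr ⟨k, by omega, hget k hk⟩
    have heq := h _ hmem
    simp only [beq_iff_eq] at heq
    rw [List.getElem?_eq_getElem hk,
        List.getElem?_eq_getElem (by omega : s + k < seq2.length), heq]
  · intro h x hx
    obtain ⟨k, hk, rfl⟩ := List.mem_iff_getElem.mp hx
    have hk' : k < seq1.length := by omega
    rw [hget k hk']
    have heq := (h k hk').2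
    rw [List.getElem?_eq_getElem hk',
        List.getElem?_eq_getElem (by omega : s + k < seq2.length)] at heq
    simp only [beq_iff_eq]
    exact Option.some.inj heq

lemma pvOuterA_eq_find? (seq1 seq2 : List Int) (L : List Int) :
    pvOuterA seq1 seq2 L =
      L.find? (fun s => decide ((pvWhileA seq1 seq2 s seq1.length 0).1 = (seq1.length : Int) ∧
        (pvWhileA seq1 seq2 s seq1.length 0).2 = false)) := by
  induction L with
  | nil => rfl
  | cons a t ih =>
    simp only [pvOuterA, ih, List.find?_cons]
    by_cases h1 : (pvWhileA seq1 seq2 a seq1.length 0).1 = (seq1.length : Int) <;>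
      cases hb : (pvWhileA seq1 seq2 a seq1.length 0).2 <;>
        simp [h1, hb]

lemma pvAltGo_eq_find? (seq1 seq2 : List Int) (m : Int) (L : List Int) :
    pvAltGo seq1 seq2 m L =
      L.find? (fun i => (seq1.zip (PySem.List.slice seq2 (some i) (some (i + m)))).all
        (fun p => p.1 == p.2)) := by
  induction L with
  | nil => rfl
  | cons a t ih =>
    simp only [pvAltGo, ih, List.find?_cons]
    cases hb : (seq1.zip (PySem.List.slice seq2 (some a) (some (a + m)))).all (fun p => p.1 == p.2) <;>
      simp [hb]

lemma pvFind?_congr_mem {α : Type} {p q : α → Bool} {l : List α} (h : ∀ x ∈ l, p x = q x) :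
    l.find? p = l.find? q := by
  induction l with
  | nil => rfl
  | cons a t ih =>
    simp only [List.find?]
    rw [h a (List.mem_cons_self)]
    cases q a <;> simp [ih fun x hx => h x (List.mem_cons_of_mem _ hx)]

-- ===== VERDICT (by name: the statement is the Claim_ definition above) =====
theorem subsequence_pos_spec : Claim_equal_subsequence_pos := by
  intro seq1 seq2 _ hpre
  unfold Spec_subsequence_pos
  have hm : 0 < seq1.length := List.length_pos_iff.mpr hpre
  letI : ∀ s : Nat, Decidable (pvQ seq1 seq2 s) := fun s => by unfold pvQ; infer_instance
  -- name the shared success predicate, as a Bool predicate on the Int window start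
  set qB : Int → Bool := fun j => decide (pvQ seq1 seq2 j.toNat) with hqB
  -- A's side reduces to find? qB over range(0, len seq2)
  have hA : subsequence_pos seq1 seq2 =
      List.find? qB (PySem.List.pyRange 0 (seq2.length : Int) 1) := by
    simp only [subsequence_pos]
    rw [pvOuterA_eq_find?]
    have hstarts : (PySem.List.enumerate seq2).foldl
        (fun acc p => if some p.2 = PySem.List.pyGet? seq1 0 then acc ++ [p.1] else acc)
        ([] : List Int) =
        List.map Prod.fst ((PySem.List.enumerate seq2).filter
          (fun q : Int × Int => decide (some q.2 = PySem.List.pyGet? seq1 0))) := by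
      simpa using PySem.List.foldl_append_if
        (fun q : Int × Int => decide (some q.2 = PySem.List.pyGet? seq1 0))
        Prod.fst (PySem.List.enumerate seq2) []
    rw [hstarts, List.find?_map, List.find?_filter,
        PySem.List.enumerate_eq_map_pyRange seq2 0, List.find?_map, Option.map_map]
    have hid : (Prod.fst ∘ fun j : Int => (j, PySem.List.pyGetD seq2 j 0)) = id := rfl
    rw [hid, Option.map_id, PySem.List.len_eq]
    apply pvFind?_congr_mem
    intro j hj
    rw [PySem.List.mem_pyRange_one] at hj
    obtain ⟨hj0, hjn⟩ := hj
    have hk : j = ((j.toNat : Nat) : Int) := (Int.toNat_of_nonneg hj0).symm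
    have hkn : j.toNat < seq2.length := by omega
    rw [Bool.eq_iff_iff]
    simp only [Function.comp, decide_eq_true_eq, hqB]
    rw [hk]
    rw [pvWhileA_iff seq1 seq2 j.toNat]
    constructor
    · exact fun h => h.2
    · intro hq
      refine ⟨?_, hq⟩
      have h0 := (hq 0 hm).2
      simp only [Int.toNat_natCast, Nat.add_zero] at h0
      rw [List.getElem?_eq_getElem hkn] at h0
      rw [PySem.List.pyGetD_natCast, PySem.List.pyGet?_zero, h0]
      simp [List.getD_eq_getElem?_getD, List.getElem?_eq_getElem hkn]
  -- B's side is find? of its window test over range(0, len seq2 - len seq1 + 1)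
  have hB : subsequence_pos_alt seq1 seq2 =
      List.find? (fun i => (seq1.zip (PySem.List.slice seq2 (some i)
          (some (i + (seq1.length : Int))))).all (fun p => p.1 == p.2))
        (PySem.List.pyRange 0 ((seq2.length : Int) - (seq1.length : Int) + 1) 1) := by
    simp only [subsequence_pos_alt]
    rw [pvAltGo_eq_find?]
  rw [hA, hB]
  by_cases hmn : seq1.length ≤ seq2.length
  · -- split A's range at len seq2 - len seq1 + 1
    rw [PySem.List.pyRange_one_append 0 ((seq2.length : Int) - (seq1.length : Int) + 1)
          (seq2.length : Int) (by omega) (by omega),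
        List.find?_append]
    have htail : List.find? qB (PySem.List.pyRange
        ((seq2.length : Int) - (seq1.length : Int) + 1) (seq2.length : Int) 1) = none := by
      rw [List.find?_eq_none]
      intro j hj
      rw [PySem.List.mem_pyRange_one] at hj
      simp only [hqB, decide_eq_true_eq]
      intro hq
      have hb := (hq (seq1.length - 1) (by omega)).1
      omega
    rw [htail, Option.or_none]
    apply pvFind?_congr_mem
    intro j hj
    rw [PySem.List.mem_pyRange_one] at hj
    obtain ⟨hj0, hjc⟩ := hj
    have hk : j = ((j.toNat : Nat) : Int) := (Int.toNat_of_nonneg hj0).symm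
    have hs : j.toNat + seq1.length ≤ seq2.length := by omega
    rw [Bool.eq_iff_iff]
    simp only [hqB, decide_eq_true_eq]
    rw [hk]
    exact (pvGood_iff seq1 seq2 j.toNat hm hs).symm
  · -- len seq2 < len seq1 : B's range is empty and A finds nothing
    rw [PySem.List.pyRange_one_eq_nil
          (a := 0) (b := (seq2.length : Int) - (seq1.length : Int) + 1) (by omega),
        List.find?_nil, List.find?_eq_none]
    intro j hj
    rw [PySem.List.mem_pyRange_one] at hj
    simp only [hqB, decide_eq_true_eq]
    intro hq
    have hb := (hq (seq1.length - 1) (by omega)).1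
    omega
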